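-- pv_equiv track=rewrite | github.com/rudyluis/PROGDAEM | Python/PythonModelosEjercicios/Data_3_10-11-2024_ListasArchivocMAtrices/ListasCompresion/Lista16.py | serieVector
-- ===== SOURCE A (Python) =====
-- def serializar(n):
--     lista=[]
--     for _ in range(0,n):
--         lista.append(0)
--     return(lista)
--
-- def serieVector(lista,n):
--     lista=serializar(n)
--     tam=len(lista)
--     cont=0
--     final=tam-1
--     for _ in range(tam//2):
--         cont+=1
--         lista[_]=cont
--         cont+=1
--         lista[final]=cont
--         final-=1
--     if(tam % 2!=0):
--         lista[tam//2]=cont+1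
--     return lista
-- ===== SOURCE B (Python) =====
-- def serieVector(lista, n):
--     # A ignores the passed-in lista (it reassigns it); so do we.
--     return [2*i + 1 if i < (n + 1)//2 else 2*(n - i) for i in range(n)]
-- ===== Notes on version B (the rewrite author's own statement) =====
-- stated objective: simpler
-- what changed: Replaced the two-pointer in-place fill (front/back converging indices with an incrementing counter and an odd-middle fixup) by a single comprehension computing each element from the closed-form formula 2*i+1 for i < (n+1)//2 and 2*(n-i) otherwise.
import Mathlib
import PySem

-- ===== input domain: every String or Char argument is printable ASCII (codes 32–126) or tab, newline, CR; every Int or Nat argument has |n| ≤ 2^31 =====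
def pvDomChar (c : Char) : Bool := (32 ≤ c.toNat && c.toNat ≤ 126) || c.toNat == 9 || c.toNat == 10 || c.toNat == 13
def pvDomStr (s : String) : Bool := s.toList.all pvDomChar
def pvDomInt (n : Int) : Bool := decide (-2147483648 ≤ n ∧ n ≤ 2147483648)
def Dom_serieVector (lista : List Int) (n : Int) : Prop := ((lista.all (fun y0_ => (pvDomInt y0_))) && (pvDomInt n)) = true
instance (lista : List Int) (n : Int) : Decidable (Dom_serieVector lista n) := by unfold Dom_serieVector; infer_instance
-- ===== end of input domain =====

-- B replaces A's two-pointer in-place fill with a single comprehension using a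
-- closed-form per-index formula (objective: simpler). Both ignore the passed-in
-- lista, exactly as A does (A reassigns it before reading it).

-- ===== PORT A =====
def serializar (n : Int) : List Int :=
  (PySem.List.pyRange 0 n 1).foldl (fun l _ => l ++ [0]) []

-- indices written by the loop (the loop counter and `final`) are always
-- non-negative and in range, where pySetD is exactly Python's `lista[i] = v`
def serieVector (lista : List Int) (n : Int) : List Int :=
  let lista := serializar n
  let tam : Int := lista.length
  let cont : Int := 0
  let final : Int := tam - 1
  let st := (PySem.List.pyRange 0 (PySem.Int.floordiv tam 2) 1).foldl
    (fun (st : List Int × Int × Int) i =>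
      let cont := st.2.1 + 1
      let l := PySem.List.pySetD st.1 i cont
      let cont := cont + 1
      let l := PySem.List.pySetD l st.2.2 cont
      (l, cont, st.2.2 - 1))
    (lista, cont, final)
  if PySem.Int.mod tam 2 ≠ 0 then
    PySem.List.pySetD st.1 (PySem.Int.floordiv tam 2) (st.2.1 + 1)
  else st.1

-- ===== PORT B =====
def serieVector_alt (lista : List Int) (n : Int) : List Int :=
  (PySem.List.pyRange 0 n 1).map
    (fun i => if i < PySem.Int.floordiv (n + 1) 2 then 2 * i + 1 else 2 * (n - i))

-- ===== PRECONDITION & SPEC =====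
def Spec_serieVector (lista : List Int) (n : Int) (out : List Int) : Prop := out = serieVector_alt lista n
instance (lista : List Int) (n : Int) (out : List Int) : Decidable (Spec_serieVector lista n out) := by unfold Spec_serieVector; infer_instance

-- ===== CLAIM (what is proved, stated in full; the proofs are below) =====
def Claim_equal_serieVector : Prop := ∀ (lista : List Int) (n : Int), Dom_serieVector lista n → Spec_serieVector lista n (serieVector lista n)

-- ===== LEMMAS AND PROOFS =====

-- the value the loop has written at index i after k iterations (t = len)
def pvG (t k i : Nat) : Int :=
  if i < k then 2 * i + 1 else if t - k ≤ i then 2 * ((t : Int) - i) else 0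

def pvL (t k : Nat) : List Int := (List.range t).map (pvG t k)

theorem pvL_zero (t : Nat) : pvL t 0 = List.replicate t 0 := by
  apply List.ext_getElem
  · simp [pvL]
  · intro i h1 h2
    simp only [pvL, List.getElem_map, List.getElem_range, List.getElem_replicate, pvG]
    have hi : i < t := by simpa [pvL] using h1
    split_ifs <;> omega

theorem pv_step (t k : Nat) (hk : k < t / 2) :
    ((pvL t k).set k (2 * (k : Int) + 1)).set (t - 1 - k) (2 * (k : Int) + 2)
      = pvL t (k + 1) := by
  apply List.ext_getElem
  · simp [pvL]
  · intro i h1 h2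
    have hi : i < t := by simpa [pvL] using h2
    simp only [List.getElem_set, pvL, List.getElem_map, List.getElem_range, pvG]
    split_ifs <;> push_cast <;> omega

theorem pv_inv (t : Nat) (k : Nat) (hk : k ≤ t / 2) :
    List.foldl
      (fun (st : List Int × Int × Int) i =>
        (PySem.List.pySetD (PySem.List.pySetD st.1 i (st.2.1 + 1)) st.2.2 (st.2.1 + 1 + 1),
          st.2.1 + 1 + 1, st.2.2 - 1))
      (pvL t k, 2 * (k : Int), (t : Int) - 1 - (k : Int))
      (PySem.List.pyRange (k : Int) ((t / 2 : Nat) : Int))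
    = (pvL t (t / 2), 2 * ((t / 2 : Nat) : Int), (t : Int) - 1 - ((t / 2 : Nat) : Int)) := by
  obtain ⟨d, hd⟩ : ∃ d, t / 2 = k + d := ⟨t / 2 - k, by omega⟩
  clear hk
  induction d generalizing k with
  | zero =>
    have : k = t / 2 := by omega
    subst this
    rw [PySem.List.pyRange_one_eq_nil (le_refl _)]
    rfl
  | succ d ih =>
    have hklt : k < t / 2 := by omega
    rw [PySem.List.pyRange_one_cons (by exact_mod_cast hklt)]
    simp only [List.foldl_cons]
    have hfin : (t : Int) - 1 - (k : Int) = ((t - 1 - k : Nat) : Int) := by omega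
    rw [hfin, PySem.List.pySetD_natCast, PySem.List.pySetD_natCast]
    rw [show (2 * (k : Int) + 1 + 1) = 2 * (k : Int) + 2 from by ring]
    rw [pv_step t k hklt]
    rw [show (2 * (k : Int) + 2) = 2 * ((k + 1 : Nat) : Int) from by omega]
    rw [show ((t - 1 - k : Nat) : Int) - 1 = (t : Int) - 1 - ((k + 1 : Nat) : Int) from by omega]
    rw [show ((k : Int) + 1) = ((k + 1 : Nat) : Int) from by omega]
    exact ih (k + 1) (by omega)

theorem pv_loop (t : Nat) :
    List.foldl
      (fun (st : List Int × Int × Int) i =>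
        (PySem.List.pySetD (PySem.List.pySetD st.1 i (st.2.1 + 1)) st.2.2 (st.2.1 + 1 + 1),
          st.2.1 + 1 + 1, st.2.2 - 1))
      (List.replicate t 0, (0 : Int), (t : Int) - 1)
      (PySem.List.pyRange 0 ((t / 2 : Nat) : Int))
    = (pvL t (t / 2), 2 * ((t / 2 : Nat) : Int), (t : Int) - 1 - ((t / 2 : Nat) : Int)) := by
  have h := pv_inv t 0 (by omega)
  simpa [pvL_zero] using h

theorem pv_alt_eq (lista : List Int) (t : Nat) :
    serieVector_alt lista ((t : Nat) : Int)
      = (List.range t).map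
          (fun (i : Nat) => if ((i : Int)) < (((t + 1) / 2 : Nat) : Int) then 2 * (i : Int) + 1
                    else 2 * ((t : Int) - (i : Int))) := by
  have hfd : PySem.Int.floordiv ((t : Int) + 1) 2 = (((t + 1) / 2 : Nat) : Int) := by
    exact_mod_cast PySem.Int.floordiv_natCast (t + 1) 2
  simp only [serieVector_alt, hfd, PySem.List.pyRange_zero_natCast, List.map_map]
  rfl

theorem pv_final_even (t : Nat) (h : t % 2 = 0) :
    pvL t (t / 2) = (List.range t).map
      (fun (i : Nat) => if ((i : Int)) < (((t + 1) / 2 : Nat) : Int) then 2 * (i : Int) + 1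
                else 2 * ((t : Int) - (i : Int))) := by
  apply List.map_congr_left
  intro i hi
  have hi' : i < t := List.mem_range.mp hi
  simp only [pvG]
  split_ifs <;> omega

theorem pv_final_odd (t : Nat) (h : t % 2 = 1) :
    (pvL t (t / 2)).set (t / 2) (2 * ((t / 2 : Nat) : Int) + 1)
      = (List.range t).map
          (fun (i : Nat) => if ((i : Int)) < (((t + 1) / 2 : Nat) : Int) then 2 * (i : Int) + 1
                    else 2 * ((t : Int) - (i : Int))) := by
  apply List.ext_getElem
  · simp [pvL]
  · intro i h1 h2
    have hi : i < t := by simpa using h2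
    simp only [List.getElem_set, pvL, List.getElem_map, List.getElem_range, pvG]
    split_ifs <;> omega

-- ===== VERDICT (by name: the statement is the Claim_ definition above) =====
theorem serieVector_spec : Claim_equal_serieVector := by
  intro lista n _
  show serieVector lista n = serieVector_alt lista n
  by_cases hn : n ≤ 0
  · have h1 : PySem.List.pyRange 0 n 1 = [] := PySem.List.pyRange_one_eq_nil hn
    simp [serieVector, serieVector_alt, serializar, h1]
  · obtain ⟨t, rfl⟩ : ∃ t : Nat, n = (t : Int) := ⟨n.toNat, by omega⟩
    have hser : serializar (t : Int) = List.replicate t 0 := by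
      rw [serializar, PySem.List.foldl_append_singleton_eq_map]
      simp [PySem.List.pyRange_one, Function.comp_def, List.map_const']
    have hlen : ((List.replicate t 0 : List Int).length : Int) = (t : Int) := by simp
    have hfd : PySem.Int.floordiv (t : Int) 2 = ((t / 2 : Nat) : Int) := by
      exact_mod_cast PySem.Int.floordiv_natCast t 2
    have hmod : PySem.Int.mod (t : Int) 2 = ((t % 2 : Nat) : Int) := by
      exact_mod_cast PySem.Int.mod_natCast t 2
    rw [serieVector]
    simp only [hser, hlen, hfd, hmod, pv_loop]
    rw [pv_alt_eq]
    rcases Nat.even_or_odd t with he | ho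
    · have h2 : t % 2 = 0 := Nat.even_iff.mp he
      rw [if_neg (by omega)]
      exact pv_final_even t h2
    · have h2 : t % 2 = 1 := Nat.odd_iff.mp ho
      rw [if_pos (by omega)]
      simp only [PySem.List.pySetD_natCast]
      exact pv_final_odd t h2
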